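-- pv_equiv track=rewrite | github.com/Thayalakrishnan/django_markdown_converter | notes/quick_test.py | merge_adjacent_like_elements
-- ===== SOURCE A (Python) =====
-- def merge_adjacent_like_elements(o_parent:list=[]) -> list:
--     """
--     loop over the elements and any elements which are adjacent and the same type should
--     be merged
--     """
--     new_parent = []
--     current_child = o_parent[0]
--     for next_child in o_parent[1:]:
--         # to merge adjacent values, they need to have the same token type, and they both must bold string values
--         if current_child[0] == next_child[0] and isinstance(current_child[1], str) and isinstance(next_child[1], str) :
--             current_child[1] = current_child[1] + next_child[1]
--             next_child[0] = "merged"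
--         else:
--             # only swap children if they do not match
--             new_parent.append(current_child)
--             current_child = next_child
--     # add the final child
--     new_parent.append(current_child)
--     return new_parent
-- ===== SOURCE B (Python) =====
-- def merge_adjacent_like_elements(o_parent: list = []) -> list:
--     """
--     Run-based rewrite: split the input into maximal mergeable runs (adjacent
--     elements with equal token type and string values), then emit one freshly
--     built element per run with its strings joined once.  Return-value
--     equivalent to A; unlike A it does not mutate the input elements and
--     returns [] on an empty list.
--     """
--     result = []
--     rest = o_parent
--     while rest:
--         head, tail = rest[0], rest[1:]
--         k = 0
--         while k < len(tail) and tail[k][0] == head[0] \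
--                 and isinstance(head[1], str) and isinstance(tail[k][1], str):
--             k += 1
--         if k > 0:
--             merged = list(head)
--             merged[1] = "".join(e[1] for e in rest[:k + 1])
--             result.append(merged)
--         else:
--             result.append(head)
--         rest = tail[k:]
--     return result
-- ===== Notes on version B (the rewrite author's own statement) =====
-- stated objective: alternative
-- what changed: B splits the input into maximal mergeable runs (adjacent elements with equal token type and string values) and emits one freshly built element per run with its strings joined once, instead of A's single in-place fold that mutates and grows the current element pair by pair; B does not mutate the input and returns [] on an empty list where A raises.
-- crash fix: On the empty list (A's own default argument) A raises IndexError on o_parent[0]; B returns []. — e.g. on merge_adjacent_like_elements([]): A raises IndexError, B returns []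
import Mathlib
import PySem

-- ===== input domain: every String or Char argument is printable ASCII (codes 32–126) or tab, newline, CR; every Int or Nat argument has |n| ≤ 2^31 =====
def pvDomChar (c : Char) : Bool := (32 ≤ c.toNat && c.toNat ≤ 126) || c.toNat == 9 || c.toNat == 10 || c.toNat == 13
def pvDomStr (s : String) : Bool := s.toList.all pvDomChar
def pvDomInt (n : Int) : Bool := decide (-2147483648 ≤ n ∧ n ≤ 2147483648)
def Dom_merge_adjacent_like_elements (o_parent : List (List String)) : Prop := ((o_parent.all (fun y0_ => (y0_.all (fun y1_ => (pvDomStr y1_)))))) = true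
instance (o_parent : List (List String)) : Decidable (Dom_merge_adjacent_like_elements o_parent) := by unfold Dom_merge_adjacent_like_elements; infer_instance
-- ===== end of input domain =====

-- B replaces A's in-place pairwise merging with a two-phase run scan (split into maximal
-- mergeable runs, then join each run's strings once); equivalence is about the RETURN
-- value only — A mutates its argument's inner lists in place, B does not.


-- ===== PORT A =====
-- Transliteration of A: state = (new_parent, current_child); one fold over o_parent[1:].
-- 'current_child[0] == next_child[0]' is the head? comparison; on List String the
-- isinstance tests are True exactly when index 1 exists, so they are ported as the
-- length checks '2 ≤ length' (when index 1 is missing Python's [1] access inside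
-- isinstance raises IndexError; exactly those inputs are excluded by Pre_ below).
-- The 'next_child[0] = "merged"' mutation marks a dropped element and never reaches the
-- returned list, so it has no counterpart in the returned value.
def merge_adjacent_like_elements (o_parent : List (List String)) : List (List String) :=
  match o_parent with
  | [] => []  -- Python raises IndexError on o_parent[0] here (excluded by Pre_)
  | current :: rest =>
    let st := rest.foldl
      (fun (st : List (List String) × List String) next =>
        if st.2.head? = next.head? ∧ 2 ≤ st.2.length ∧ 2 ≤ next.length then
          -- current_child[1] = current_child[1] + next_child[1]
          (st.1, st.2.set 1 (st.2.getD 1 "" ++ next.getD 1 ""))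
        else
          (st.1 ++ [st.2], next))
      ([], current)
    st.1 ++ [st.2]

-- ===== PORT B =====
-- Transliteration of B (Source B): outer while-loop over the remaining suffix 'rest' becomes
-- structural recursion; the inner index scan 'while k < len(tail) and tail[k][0] == head[0]
-- and isinstance(head[1], str) and isinstance(tail[k][1], str)' computes the length of
-- tail.takeWhile of that condition (the isinstance tests, as in port A, are the length
-- checks '2 ≤ length' on List String); rest[:k+1] is (head :: tail).take (k+1);
-- "".join(e[1] for e in …) is PySem.Str.join "" over the run's e.getD 1 "" (e[1]
-- raising happens only outside Pre_).
def pvAltLoop : Nat → List (List String) → List (List String)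
  | _, [] => []
  | 0, _ :: _ => []  -- fuel is the list's length, so this is never reached
  | fuel + 1, head :: tail =>
    let k := (tail.takeWhile (fun e =>
        e.head? == head.head? && decide (2 ≤ head.length) && decide (2 ≤ e.length))).length
    (if 0 < k then
        head.set 1 (PySem.Str.join "" (((head :: tail).take (k + 1)).map (fun e => e.getD 1 "")))
      else head)
      :: pvAltLoop fuel (tail.drop k)

def merge_adjacent_like_elements_alt (o_parent : List (List String)) : List (List String) :=
  pvAltLoop o_parent.length o_parent

-- ===== PRECONDITION & SPEC =====
-- Pre_ is exactly the set of inputs on which Python A returns normally: a nonempty list,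
-- and — as soon as there are two elements — no empty inner list (o_parent[i][0] is read
-- for every element) and, on every adjacent pair with equal token type, both inner lists
-- long enough for the [1] accesses the merge condition performs (else IndexError).
def Pre_merge_adjacent_like_elements (o_parent : List (List String)) : Prop :=
  o_parent ≠ [] ∧
  (2 ≤ o_parent.length →
    (∀ x ∈ o_parent, x ≠ []) ∧
    List.IsChain (fun a b => a.head? = b.head? → 2 ≤ a.length ∧ 2 ≤ b.length) o_parent)
instance (o_parent : List (List String)) : Decidable (Pre_merge_adjacent_like_elements o_parent) := by unfold Pre_merge_adjacent_like_elements; infer_instance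

def pvWitness_merge_adjacent_like_elements : List (List String) :=
  [["p", "a"], ["p", "b"], ["q", "c"]]

-- A raises IndexError on the empty list (its own default argument!); B returns [].
def Raises_merge_adjacent_like_elements (o_parent : List (List String)) : Prop :=
  o_parent = []
instance (o_parent : List (List String)) : Decidable (Raises_merge_adjacent_like_elements o_parent) := by unfold Raises_merge_adjacent_like_elements; infer_instance
def pvRaiseWitness_merge_adjacent_like_elements : List (List String) := []
def pvRaiseWitnessOut_merge_adjacent_like_elements : List (List String) := []

def Spec_merge_adjacent_like_elements (o_parent : List (List String)) (out : List (List String)) : Prop := out = merge_adjacent_like_elements_alt o_parent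
instance (o_parent : List (List String)) (out : List (List String)) : Decidable (Spec_merge_adjacent_like_elements o_parent out) := by unfold Spec_merge_adjacent_like_elements; infer_instance

-- ===== CLAIM (what is proved, stated in full; the proofs are below) =====
def Claim_equal_merge_adjacent_like_elements : Prop := ∀ (o_parent : List (List String)), Dom_merge_adjacent_like_elements o_parent → Pre_merge_adjacent_like_elements o_parent → Spec_merge_adjacent_like_elements o_parent (merge_adjacent_like_elements o_parent)
def Claim_raises_merge_adjacent_like_elements : Prop := (∀ (o_parent : List (List String)), Dom_merge_adjacent_like_elements o_parent → Raises_merge_adjacent_like_elements o_parent → ¬ Pre_merge_adjacent_like_elements o_parent) ∧ (Dom_merge_adjacent_like_elements (pvRaiseWitness_merge_adjacent_like_elements) ∧ Raises_merge_adjacent_like_elements (pvRaiseWitness_merge_adjacent_like_elements) ∧ merge_adjacent_like_elements_alt (pvRaiseWitness_merge_adjacent_like_elements) = pvRaiseWitnessOut_merge_adjacent_like_elements)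

-- ===== LEMMAS AND PROOFS =====

-- Recursive rendering of A's fold: 'goA current rest' is A's loop from state current.
def goA (cur : List String) : List (List String) → List (List String)
  | [] => [cur]
  | n :: rest =>
    if cur.head? = n.head? ∧ 2 ≤ cur.length ∧ 2 ≤ n.length then
      goA (cur.set 1 (cur.getD 1 "" ++ n.getD 1 "")) rest
    else cur :: goA n rest

lemma foldlA_eq_goA (rest : List (List String)) :
    ∀ (acc : List (List String)) (cur : List String),
    (rest.foldl
        (fun (st : List (List String) × List String) next =>
          if st.2.head? = next.head? ∧ 2 ≤ st.2.length ∧ 2 ≤ next.length then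
            (st.1, st.2.set 1 (st.2.getD 1 "" ++ next.getD 1 ""))
          else
            (st.1 ++ [st.2], next))
        (acc, cur)).1
      ++ [(rest.foldl
        (fun (st : List (List String) × List String) next =>
          if st.2.head? = next.head? ∧ 2 ≤ st.2.length ∧ 2 ≤ next.length then
            (st.1, st.2.set 1 (st.2.getD 1 "" ++ next.getD 1 ""))
          else
            (st.1 ++ [st.2], next))
        (acc, cur)).2] = acc ++ goA cur rest := by
  induction rest with
  | nil => intro acc cur; simp [goA]
  | cons n rest ih =>
    intro acc cur
    by_cases h : cur.head? = n.head? ∧ 2 ≤ cur.length ∧ 2 ≤ n.length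
    · simp only [List.foldl_cons, if_pos h, goA, ih]
    · simp only [List.foldl_cons, goA, if_neg h, ih, List.append_assoc,
        List.singleton_append]

lemma merge_eq_goA (c : List String) (rest : List (List String)) :
    merge_adjacent_like_elements (c :: rest) = goA c rest := by
  simpa [merge_adjacent_like_elements] using foldlA_eq_goA rest [] c

-- set at index 1 on a list of length ≥ 2: preserves head?, stores the value
lemma head?_set1 (l : List String) (s : String) (h : 2 ≤ l.length) :
    (l.set 1 s).head? = l.head? := by
  match l, h with
  | a :: b :: t, _ => rfl

lemma getD1_set1 (l : List String) (s : String) (h : 2 ≤ l.length) :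
    (l.set 1 s).getD 1 "" = s := by
  match l, h with
  | a :: b :: t, _ => rfl

lemma set1_getD1_self (l : List String) (h : 2 ≤ l.length) :
    l.set 1 (l.getD 1 "") = l := by
  match l, h with
  | a :: b :: t, _ => rfl

lemma join_empty_cons (a : String) (l : List String) :
    PySem.Str.join "" (a :: l) = a ++ PySem.Str.join "" l := by
  apply String.toList_injective
  simp [PySem.Str.join, PySem.Chars.join]
  cases l <;> simp [List.intercalate]

-- goA consumes a whole run of equal-head, length-≥2 elements into one set at index 1
lemma goA_run (run : List (List String)) :
    ∀ (cur : List String) (s : String) (tl : List (List String)),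
    2 ≤ cur.length →
    (∀ e ∈ run, e.head? = cur.head? ∧ 2 ≤ e.length) →
    (∀ n ∈ tl.head?, ¬ (n.head? = cur.head? ∧ 2 ≤ n.length)) →
    goA (cur.set 1 s) (run ++ tl)
      = cur.set 1 (s ++ PySem.Str.join "" (run.map (fun e => e.getD 1 "")))
        :: (match tl with | [] => [] | n :: t => goA n t) := by
  induction run with
  | nil =>
    intro cur s tl hcur _ hmis
    match tl with
    | [] => simp [goA, PySem.Str.join, PySem.Chars.join, List.intercalate]
    | n :: t =>
      have hne := hmis n rfl
      have hng : ¬ ((cur.set 1 s).head? = n.head? ∧ 2 ≤ (cur.set 1 s).length ∧ 2 ≤ n.length) := by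
        rw [head?_set1 cur s hcur]
        exact fun hc => hne ⟨hc.1.symm, hc.2.2⟩
      simp only [List.nil_append, goA, if_neg hng, List.map_nil]
      simp [PySem.Str.join, PySem.Chars.join, List.intercalate]
  | cons r run ih =>
    intro cur s tl hcur hrun hmis
    have hr := hrun r (List.mem_cons_self ..)
    have hcond : (cur.set 1 s).head? = r.head? ∧ 2 ≤ (cur.set 1 s).length ∧ 2 ≤ r.length := by
      refine ⟨?_, ?_, hr.2⟩
      · rw [head?_set1 cur s hcur]; exact hr.1.symm
      · simpa using hcur
    simp only [List.cons_append, goA, if_pos hcond, List.set_set, getD1_set1 cur s hcur]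
    rw [ih cur (s ++ r.getD 1 "") tl hcur (fun e he => hrun e (List.mem_cons_of_mem _ he)) hmis]
    rw [List.map_cons, join_empty_cons, String.append_assoc]

-- head of what remains after dropping the takeWhile prefix fails the predicate
lemma head_drop_takeWhile_not {α : Type} (p : α → Bool) (l : List α) :
    ∀ n ∈ (l.drop (l.takeWhile p).length).head?, p n = false := by
  induction l with
  | nil => intro n h; simp at h
  | cons a l ih =>
    intro n h
    by_cases hp : p a
    · rw [List.takeWhile_cons_of_pos hp] at h
      exact ih n (by simpa using h)
    · rw [List.takeWhile_cons_of_neg (by simpa using hp)] at h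
      simp at h
      subst h
      simpa using hp

lemma pvAltLoop_nil (fuel : Nat) : pvAltLoop fuel [] = [] := by
  cases fuel <;> rfl

-- main induction: A's loop equals B's run scan (no side conditions: the run predicate
-- of B is exactly A's merge condition against the unchanged head of the run)
lemma goA_eq_pvAltLoop (N : Nat) :
    ∀ (o : List (List String)), o.length ≤ N →
    (match o with | [] => [] | hd :: tl => goA hd tl) = pvAltLoop N o := by
  induction N with
  | zero =>
    intro o hlen
    match o, hlen with
    | [], _ => rfl
  | succ N ih =>
    intro o hlen
    match o with
    | [] => rfl
    | hd :: tail =>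
      set p : List String → Bool := fun e =>
        e.head? == hd.head? && decide (2 ≤ hd.length) && decide (2 ≤ e.length) with hp
      set run := tail.takeWhile p with hrundef
      have hrun_prop : ∀ e ∈ run, e.head? = hd.head? ∧ 2 ≤ hd.length ∧ 2 ≤ e.length := by
        intro e he
        have := List.mem_takeWhile_imp (hrundef ▸ he)
        have h2 : (e.head? = hd.head? ∧ 2 ≤ hd.length) ∧ 2 ≤ e.length := by simpa [hp] using this
        exact ⟨h2.1.1, h2.1.2, h2.2⟩
      have hfail : ∀ n ∈ (tail.drop run.length).head?,
          ¬ (n.head? = hd.head? ∧ 2 ≤ hd.length ∧ 2 ≤ n.length) := by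
        intro n hn
        have := head_drop_takeWhile_not p tail n (by rw [← hrundef]; exact hn)
        simpa [hp] using this
      have hlen_drop : (tail.drop run.length).length ≤ N := by
        simp only [List.length_drop]
        have : tail.length + 1 ≤ N + 1 := by simpa using hlen
        omega
      have ihdrop := ih (tail.drop run.length) hlen_drop
      rw [pvAltLoop]
      simp only [← hp, ← hrundef]
      by_cases hk : run.length = 0
      · -- singleton run: emit hd unchanged
        rw [hk]
        simp only [lt_irrefl, List.drop_zero]
        match tail with
        | [] => simp [goA, pvAltLoop_nil]
        | n :: t =>
          have hnotp := hfail n (by rw [hk]; rfl)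
          have hcond : ¬ (hd.head? = n.head? ∧ 2 ≤ hd.length ∧ 2 ≤ n.length) := by
            exact fun hc => hnotp ⟨hc.1.symm, hc.2.1, hc.2.2⟩
          rw [goA, if_neg hcond]
          have h2 := ihdrop
          rw [hk, List.drop_zero] at h2
          rw [← h2]
          simp
      · -- merged run
        have hrun_ne : run ≠ [] := fun h => hk (by simp [h])
        obtain ⟨r0, run', hr0⟩ := List.exists_cons_of_ne_nil hrun_ne
        have hhd2 : 2 ≤ hd.length := (hrun_prop r0 (by rw [hr0]; exact List.mem_cons_self ..)).2.1
        have htake : (hd :: tail).take (run.length + 1) = hd :: run := by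
          simp only [List.take_succ_cons]
          congr 1
          conv_lhs => rw [← List.takeWhile_append_dropWhile (p := p) (l := tail), ← hrundef]
          exact List.take_left
        rw [if_pos (Nat.pos_of_ne_zero hk), htake]
        have hdropw : tail.drop run.length = tail.dropWhile p := by
          conv_lhs => rw [← List.takeWhile_append_dropWhile (p := p) (l := tail)]
          rw [← hrundef, List.drop_left]
        have hgoA : goA hd (run ++ tail.drop run.length)
            = hd.set 1 (hd.getD 1 "" ++ PySem.Str.join "" (run.map (fun e => e.getD 1 "")))
              :: (match tail.drop run.length with | [] => [] | n :: t => goA n t) := by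
          conv_lhs => rw [← set1_getD1_self hd hhd2]
          exact goA_run run hd (hd.getD 1 "") (tail.drop run.length) hhd2
            (fun e he => ⟨(hrun_prop e he).1, (hrun_prop e he).2.2⟩)
            (fun n hn hc => hfail n hn ⟨hc.1, hhd2, hc.2⟩)
        have htail_split : goA hd tail = goA hd (run ++ tail.drop run.length) := by
          congr 1
          conv_lhs => rw [← List.takeWhile_append_dropWhile (p := p) (l := tail)]
          rw [← hrundef, hdropw]
        rw [htail_split, hgoA, ihdrop]
        rw [List.map_cons, join_empty_cons]

-- ===== VERDICT (by name: the statement is the Claim_ definition above) =====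
theorem merge_adjacent_like_elements_spec : Claim_equal_merge_adjacent_like_elements := by
  intro o _ hpre
  unfold Spec_merge_adjacent_like_elements merge_adjacent_like_elements_alt
  match o, hpre.1 with
  | x :: t, _ =>
    rw [merge_eq_goA]
    exact goA_eq_pvAltLoop (x :: t).length (x :: t) le_rfl

@[simp]
theorem merge_adjacent_like_elements_raises : Claim_raises_merge_adjacent_like_elements := by
  unfold Claim_raises_merge_adjacent_like_elements
  constructor
  · intro o _ hr hpre; exact hpre.1 hr
  · exact ⟨by decide, rfl, rfl⟩
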